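-- pv_equiv track=rewrite | github.com/ellamind/eval-hive | eval_hive/status.py | get_unique_progress
-- ===== SOURCE A (Python) =====
-- def get_unique_progress(
--     completed: set[str],
--     task_map: dict[str, list[str]],
--     suites: list[str],
--     hf_tasks: set[str] | None = None,
-- ) -> tuple[int, int, int]:
--     """Returns (local, hf_only, total) across all suites, deduplicating shared tasks."""
--     all_tasks = set()
--     for s in suites:
--         all_tasks.update(task_map.get(s, []))
--     hf_tasks = hf_tasks or set()
--     local = 0
--     hf_only = 0
--     for t in all_tasks:
--         if t in completed:
--             local += 1
--         elif t in hf_tasks: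
--             hf_only += 1
--     return local, hf_only, len(all_tasks)
-- ===== SOURCE B (Python) =====
-- def get_unique_progress(
--     completed: set[str],
--     task_map: dict[str, list[str]],
--     suites: list[str],
--     hf_tasks: set[str] | None = None,
-- ) -> tuple[int, int, int]:
--     """Returns (local, hf_only, total) across all suites, deduplicating shared tasks."""
--     tasks = sorted(t for s in suites for t in task_map.get(s, []))
--     hf = hf_tasks or set()
--     local = hf_only = total = 0
--     prev = None
--     for t in tasks:
--         if t == prev:
--             continue
--         prev = t
--         total += 1
--         if t in completed:
--             local += 1
--         elif t in hf:
--             hf_only += 1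
--     return local, hf_only, total
-- ===== Notes on version B (the rewrite author's own statement) =====
-- stated objective: alternative
-- what changed: B never builds a set: it collects all suite tasks into one list, sorts it, and does a single sorted scan that skips adjacent duplicates while classifying each distinct task, replacing A's hash-set union plus counting loop by sort-then-scan deduplication.
import Mathlib
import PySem

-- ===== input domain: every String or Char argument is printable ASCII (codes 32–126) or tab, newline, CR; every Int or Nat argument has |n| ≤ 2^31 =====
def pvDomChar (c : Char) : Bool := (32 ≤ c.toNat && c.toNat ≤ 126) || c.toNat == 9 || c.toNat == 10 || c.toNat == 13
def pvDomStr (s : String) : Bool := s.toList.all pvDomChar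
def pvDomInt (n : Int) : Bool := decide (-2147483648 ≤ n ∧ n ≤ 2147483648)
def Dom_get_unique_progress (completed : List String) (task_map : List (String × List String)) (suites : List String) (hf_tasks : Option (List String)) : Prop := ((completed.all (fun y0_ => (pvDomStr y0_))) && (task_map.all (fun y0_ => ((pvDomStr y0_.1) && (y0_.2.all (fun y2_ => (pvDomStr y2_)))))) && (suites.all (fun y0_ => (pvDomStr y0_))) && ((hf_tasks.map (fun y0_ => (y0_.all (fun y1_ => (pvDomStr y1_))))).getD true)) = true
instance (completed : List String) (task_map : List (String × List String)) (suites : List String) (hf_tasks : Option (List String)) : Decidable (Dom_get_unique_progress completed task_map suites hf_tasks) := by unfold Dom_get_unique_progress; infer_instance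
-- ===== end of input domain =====

-- B deduplicates by sort-then-scan over one flat task list instead of A's hash-set union and counting loop; alternative, same result.

-- ===== PORT A =====
-- first-match lookup on the association list = dict.get(s, [])
def pvTmGetA (task_map : List (String × List String)) (s : String) : List String :=
  ((task_map.find? (fun p => p.1 == s)).map (·.2)).getD []

def get_unique_progress (completed : List String) (task_map : List (String × List String)) (suites : List String) (hf_tasks : Option (List String)) : Int × Int × Int :=
  let all_tasks : PySem.Set String :=
    suites.foldl (fun acc s => PySem.Set.update acc (pvTmGetA task_map s)) PySem.Set.empty
  let hfs : PySem.Set String := hf_tasks.getD []   -- 'hf_tasks or set()' (None and the empty set both give the empty set)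
  let p : Int × Int :=
    all_tasks.foldl (fun (p : Int × Int) t =>
      if completed.contains t then (p.1 + 1, p.2)
      else if hfs.contains t then (p.1, p.2 + 1)
      else p) (0, 0)
  (p.1, p.2, PySem.Set.len all_tasks)

-- ===== PORT B =====
def pvTmGetB (task_map : List (String × List String)) (s : String) : List String :=
  ((task_map.find? (fun p => p.1 == s)).map (·.2)).getD []

-- the loop body of B's sorted scan: state = (prev, local, hf_only, total)
def pvScanB (completed hfs : List String) (st : Option String × Int × Int × Int) (t : String) : Option String × Int × Int × Int :=
  if some t == st.1 then st
  else if completed.contains t then (some t, st.2.1 + 1, st.2.2.1, st.2.2.2 + 1)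
  else if hfs.contains t then (some t, st.2.1, st.2.2.1 + 1, st.2.2.2 + 1)
  else (some t, st.2.1, st.2.2.1, st.2.2.2 + 1)

def get_unique_progress_alt (completed : List String) (task_map : List (String × List String)) (suites : List String) (hf_tasks : Option (List String)) : Int × Int × Int :=
  let tasks : List String :=
    PySem.List.sorted (suites.flatMap (fun s => pvTmGetB task_map s)) (fun x => x) false
  let hfs : List String := hf_tasks.getD []
  let r := tasks.foldl (pvScanB completed hfs) (none, 0, 0, 0)
  (r.2.1, r.2.2.1, r.2.2.2)

-- ===== PRECONDITION & SPEC =====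
def Spec_get_unique_progress (completed : List String) (task_map : List (String × List String)) (suites : List String) (hf_tasks : Option (List String)) (out : Int × Int × Int) : Prop := out = get_unique_progress_alt completed task_map suites hf_tasks
instance (completed : List String) (task_map : List (String × List String)) (suites : List String) (hf_tasks : Option (List String)) (out : Int × Int × Int) : Decidable (Spec_get_unique_progress completed task_map suites hf_tasks out) := by unfold Spec_get_unique_progress; infer_instance

-- ===== CLAIM (what is proved, stated in full; the proofs are below) =====
def Claim_equal_get_unique_progress : Prop := ∀ (completed : List String) (task_map : List (String × List String)) (suites : List String) (hf_tasks : Option (List String)), Dom_get_unique_progress completed task_map suites hf_tasks → Spec_get_unique_progress completed task_map suites hf_tasks (get_unique_progress completed task_map suites hf_tasks)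

-- ===== LEMMAS AND PROOFS =====

-- the elements B's scan actually processes (those not equal to the running prev)
def pvKeep (p : Option String) : List String → List String
  | [] => []
  | x :: xs => if some x == p then pvKeep p xs else x :: pvKeep (some x) xs

lemma pv_scan_eq_keep (completed hfs : List String) :
    ∀ (L : List String) (p : Option String) (a b c : Int),
      (L.foldl (pvScanB completed hfs) (p, a, b, c)).2
        = (a + ((pvKeep p L).filter (fun t => completed.contains t)).length,
           b + ((pvKeep p L).filter (fun t => !completed.contains t && hfs.contains t)).length,
           c + (pvKeep p L).length) := by
  intro L
  induction L with
  | nil => intro p a b c; simp [pvKeep]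
  | cons x xs ih =>
      intro p a b c
      rw [List.foldl_cons]
      by_cases hp : (some x == p) = true
      · simp [pvScanB, pvKeep, hp, ih]
      · have hb : (some x == p) = false := by simpa using hp
        by_cases hc : x ∈ completed
        · simp only [pvScanB, hb, Bool.false_eq_true, if_false, pvKeep, ih]
          simp [hc, Prod.ext_iff]
          omega
        · by_cases hh : x ∈ hfs
          · simp only [pvScanB, hb, Bool.false_eq_true, if_false, pvKeep, ih]
            simp [hc, hh, Prod.ext_iff]
            omega
          · simp only [pvScanB, hb, Bool.false_eq_true, if_false, pvKeep, ih]
            simp [hc, hh, Prod.ext_iff]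
            omega

lemma pv_keep_spec :
    ∀ (L : List String), L.Pairwise (· ≤ ·) →
      ∀ (p : Option String), (∀ m, p = some m → ∀ x ∈ L, m ≤ x) →
        (pvKeep p L).Nodup ∧ ∀ y, y ∈ pvKeep p L ↔ (y ∈ L ∧ some y ≠ p) := by
  intro L
  induction L with
  | nil => intro _ p _; simp [pvKeep]
  | cons x xs ih =>
      intro hpw p hp
      have hx : ∀ y ∈ xs, x ≤ y := (List.pairwise_cons.mp hpw).1
      have hpw' := (List.pairwise_cons.mp hpw).2
      obtain ⟨hnd, hmem⟩ := ih hpw' (some x) (by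
        intro m hm y hy; cases hm; exact hx y hy)
      by_cases hpx : p = some x
      · subst hpx
        have hkeq : pvKeep (some x) (x :: xs) = pvKeep (some x) xs := by simp [pvKeep]
        rw [hkeq]
        refine ⟨hnd, fun y => ?_⟩
        rw [hmem y]
        constructor
        · rintro ⟨h1, h2⟩; exact ⟨List.mem_cons_of_mem _ h1, h2⟩
        · rintro ⟨h1, h2⟩
          rcases List.mem_cons.mp h1 with rfl | h1'
          · exact absurd rfl h2
          · exact ⟨h1', h2⟩
      · have hb : (some x == p) = false := by
          simp only [beq_eq_false_iff_ne]
          exact fun h => hpx h.symm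
        have hkeq : pvKeep p (x :: xs) = x :: pvKeep (some x) xs := by
          simp [pvKeep, hb]
        have hxnot : x ∉ pvKeep (some x) xs := fun hc => ((hmem x).mp hc).2 rfl
        rw [hkeq]
        refine ⟨List.nodup_cons.mpr ⟨hxnot, hnd⟩, fun y => ?_⟩
        simp only [List.mem_cons, hmem]
        constructor
        · rintro (rfl | ⟨h1, h2⟩)
          · exact ⟨Or.inl rfl, fun h => hpx h.symm⟩
          · refine ⟨Or.inr h1, fun hyp => ?_⟩
            have h3 : y ≤ x := hp y hyp.symm x (by simp)
            have h4 : x ≤ y := hx y h1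
            exact h2 (congrArg some (le_antisymm h3 h4))
        · rintro ⟨rfl | h1, h2⟩
          · exact Or.inl rfl
          · by_cases hxy : y = x
            · exact Or.inl hxy
            · exact Or.inr ⟨h1, fun h => hxy (Option.some_injective _ h)⟩

-- A's set-union fold over suites = the add-fold over the flattened task list
lemma pv_fold_update_eq (task_map : List (String × List String)) :
    ∀ (suites : List String) (acc : PySem.Set String),
      suites.foldl (fun acc s => PySem.Set.update acc (pvTmGetA task_map s)) acc
        = (suites.flatMap (fun s => pvTmGetA task_map s)).foldl PySem.Set.add acc := by
  intro suites
  induction suites with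
  | nil => intro acc; simp
  | cons s rest ih =>
      intro acc
      rw [List.foldl_cons, ih, List.flatMap_cons, List.foldl_append]
      rfl

-- A's counting loop over the deduplicated set
lemma pv_count_loop (completed : List String) (hfs : PySem.Set String) :
    ∀ (L : List String) (a b : Int),
      L.foldl (fun (p : Int × Int) t =>
          if completed.contains t then (p.1 + 1, p.2)
          else if PySem.Set.contains hfs t then (p.1, p.2 + 1)
          else p) (a, b)
        = (a + ((L.filter (fun t => completed.contains t)).length : Int),
           b + ((L.filter (fun t => !completed.contains t && PySem.Set.contains hfs t)).length : Int)) := by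
  intro L
  induction L with
  | nil => intro a b; simp
  | cons x xs ih =>
      intro a b
      rw [List.foldl_cons]
      by_cases hc : completed.contains x = true
      · rw [if_pos hc, ih]
        have hc' : x ∈ completed := by simpa using hc
        simp [hc', Prod.ext_iff]
        omega
      · have hc' : x ∉ completed := by simpa using hc
        by_cases hh : PySem.Set.contains hfs x = true
        · rw [if_neg hc, if_pos hh, ih]
          have hh' : x ∈ hfs := by simpa [PySem.Set.contains] using hh
          simp [hc', hh', PySem.Set.contains, Prod.ext_iff]
          omega
        · have hh' : x ∉ hfs := by simpa [PySem.Set.contains] using hh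
          rw [if_neg hc, if_neg hh, ih]
          simp [hc', hh', PySem.Set.contains]

-- two nodup lists with the same members are permutations, so all filter-lengths agree
lemma pv_filter_len_eq {l₁ l₂ : List String} (h₁ : l₁.Nodup) (h₂ : l₂.Nodup)
    (hm : ∀ y, y ∈ l₁ ↔ y ∈ l₂) (f : String → Bool) :
    (l₁.filter f).length = (l₂.filter f).length := by
  have hperm : l₁.Perm l₂ := (List.perm_ext_iff_of_nodup h₁ h₂).mpr hm
  exact (hperm.filter f).length_eq

-- ===== VERDICT (by name: the statement is the Claim_ definition above) =====
theorem get_unique_progress_spec : Claim_equal_get_unique_progress := by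
  intro completed task_map suites hf_tasks _
  unfold Spec_get_unique_progress
  have htm : pvTmGetB = pvTmGetA := rfl
  have hemp : (PySem.Set.empty : PySem.Set String) = [] := rfl
  simp only [get_unique_progress, get_unique_progress_alt, htm]
  set F : List String := suites.flatMap (fun s => pvTmGetA task_map s) with hF
  set S : List String := PySem.List.sorted F (fun x => x) false with hS
  have hpw : S.Pairwise (· ≤ ·) := by
    simpa using PySem.List.sorted_pairwise (xs := F) (key := fun x => x)
  obtain ⟨hnd, hmem⟩ := pv_keep_spec S hpw none (by intro m hm; cases hm)
  have hmem' : ∀ y, y ∈ pvKeep none S ↔ y ∈ PySem.List.dedup F := by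
    intro y
    rw [hmem y, PySem.List.mem_dedup]
    have hys : y ∈ S ↔ y ∈ F := by
      rw [hS]; exact PySem.List.mem_sorted _ _ _ _
    simp [hys]
  have hndD : (PySem.List.dedup F).Nodup := PySem.List.nodup_dedup F
  have hA : suites.foldl (fun acc s => PySem.Set.update acc (pvTmGetA task_map s)) PySem.Set.empty
      = PySem.Set.ofList F := by
    rw [pv_fold_update_eq, hemp, ← PySem.Set.ofList_eq_foldl]
  have hmemD : ∀ y, y ∈ pvKeep none S ↔ y ∈ PySem.Set.ofList F := by
    intro y
    rw [hmem' y, PySem.List.dedup_eq_ofList]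
  have hndO : (PySem.Set.ofList F : List String).Nodup := by
    rw [← PySem.List.dedup_eq_ofList]; exact hndD
  have hlenO : (pvKeep none S).length = (PySem.Set.ofList F : List String).length :=
    ((List.perm_ext_iff_of_nodup hnd hndO).mpr hmemD).length_eq
  have h1 := pv_filter_len_eq hndO hnd (fun y => (hmemD y).symm)
      (fun t => completed.contains t)
  have h2 := pv_filter_len_eq hndO hnd (fun y => (hmemD y).symm)
      (fun t => !completed.contains t && PySem.Set.contains (hf_tasks.getD []) t)
  rw [hA, pv_count_loop, pv_scan_eq_keep]
  simp only [PySem.Set.contains] at h2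
  simp at h1 h2
  simp [PySem.Set.len, h1, h2, hlenO]
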